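-- pv_equiv track=rewrite | github.com/rohitsadhu1947/adm-platform-vercel | backend/domain/playbook_engine.py | get_next_step_number
-- ===== SOURCE A (Python) =====
-- def get_next_step_number(
--     current_step: int,
--     steps: list[dict],
--     override_next: int | None = None,
-- ) -> int | None:
--     """Determine the next step number in a playbook.
--
--     Args:
--         current_step: Current step number.
--         steps: All playbook step definitions.
--         override_next: Override from branching rules.
--
--     Returns:
--         Next step number, or None if playbook is complete.
--     """
--     if override_next is not None:
--         # Validate the override step exists
--         if any(s.get("step_number") == override_next for s in steps):
--             return override_next
--
--     # Default: move to next sequential step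
--     step_numbers = sorted(s.get("step_number", 0) for s in steps)
--     try:
--         idx = step_numbers.index(current_step)
--         if idx + 1 < len(step_numbers):
--             return step_numbers[idx + 1]
--     except ValueError:
--         pass
--
--     return None  # Playbook complete
-- ===== SOURCE B (Python) =====
-- def get_next_step_number(
--     current_step: int,
--     steps: list[dict],
--     override_next: int | None = None,
-- ) -> int | None:
--     """Single linear pass: validate the override, check that current_step is a
--     known step, and track the smallest step number greater than current_step."""
--     override_found = False
--     seen = False
--     succ = None
--     for s in steps:
--         n = s.get("step_number", 0)
--         if override_next is not None and s.get("step_number") == override_next: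
--             override_found = True
--         if n == current_step:
--             seen = True
--         elif n > current_step and (succ is None or n < succ):
--             succ = n
--     if override_found:
--         return override_next
--     if seen:
--         return succ
--     return None
-- ===== Notes on version B (the rewrite author's own statement) =====
-- stated objective: alternative
-- what changed: Replaced sort-then-index-then-successor lookup by a single linear pass that tracks the override match, whether current_step is a known step, and the minimum step number greater than current_step.
-- intended difference: When no override applies and current_step's number occurs more than once among the step numbers, A returns current_step itself (the duplicate is its sorted-list neighbour), which would make the playbook loop on the same step; B returns the smallest step number greater than current_step (or None), the intended next sequential step. — e.g. on get_next_step_number(1, [[("step_number", 1)], [("step_number", 1)]], none): A returns some 1, B returns none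
import Mathlib
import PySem

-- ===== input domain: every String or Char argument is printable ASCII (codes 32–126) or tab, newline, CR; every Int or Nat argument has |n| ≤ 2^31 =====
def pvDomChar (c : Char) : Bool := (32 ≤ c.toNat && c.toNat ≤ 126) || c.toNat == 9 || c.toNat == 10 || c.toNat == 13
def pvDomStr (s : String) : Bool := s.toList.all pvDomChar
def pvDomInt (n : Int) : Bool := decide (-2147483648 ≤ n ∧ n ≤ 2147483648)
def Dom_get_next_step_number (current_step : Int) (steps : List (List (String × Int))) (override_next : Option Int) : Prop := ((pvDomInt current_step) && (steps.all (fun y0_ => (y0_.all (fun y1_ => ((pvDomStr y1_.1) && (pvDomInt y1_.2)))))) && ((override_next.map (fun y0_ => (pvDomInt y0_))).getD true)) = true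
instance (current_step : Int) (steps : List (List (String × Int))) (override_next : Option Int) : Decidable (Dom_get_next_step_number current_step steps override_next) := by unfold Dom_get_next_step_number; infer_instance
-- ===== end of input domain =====

-- B replaces A's sort + index + successor lookup by one linear pass tracking the
-- override match, whether current_step is present, and the minimum step number
-- greater than current_step; on duplicated current_step numbers (no override)
-- A returns current_step again while B returns the true successor (see D_).


-- ===== PORT A =====
def get_next_step_number (current_step : Int) (steps : List (List (String × Int))) (override_next : Option Int) : Option Int :=
  -- if override_next is not None: if any(s.get("step_number") == override_next for s in steps): return override_next
  let validated : Bool :=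
    match override_next with
    | some ov => steps.any (fun s => (PySem.Dict.mk s).get? "step_number" == some ov)
    | none => false
  if validated then override_next
  else
    -- step_numbers = sorted(s.get("step_number", 0) for s in steps)
    let step_numbers := PySem.List.sorted (steps.map (fun s => (PySem.Dict.mk s).getD "step_number" 0)) (fun x => x) false
    match PySem.List.index? step_numbers current_step with
    | some idx =>
        if ((idx : Int) + 1) < (step_numbers.length : Int) then
          PySem.List.pyGet? step_numbers ((idx : Int) + 1)
        else none
    | none => none

-- ===== PORT B =====
def get_next_step_number_alt (current_step : Int) (steps : List (List (String × Int))) (override_next : Option Int) : Option Int :=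
  let st : Bool × Bool × Option Int :=
    steps.foldl (fun acc s =>
      let n := (PySem.Dict.mk s).getD "step_number" 0
      let found := acc.1 ||
        (match override_next with
         | some ov => (PySem.Dict.mk s).get? "step_number" == some ov
         | none => false)
      if n = current_step then (found, true, acc.2.2)
      else
        match acc.2.2 with
        | none => if current_step < n then (found, acc.2.1, some n) else (found, acc.2.1, acc.2.2)
        | some m => if current_step < n ∧ n < m then (found, acc.2.1, some n) else (found, acc.2.1, acc.2.2)
      ) (false, false, none)
  if st.1 then override_next
  else if st.2.1 then st.2.2
  else none

-- ===== PRECONDITION & SPEC =====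
-- When no override applies and current_step's number occurs more than once among the
-- step numbers, A returns current_step itself (its duplicate is the sorted-list
-- neighbour), which would loop the playbook on the same step; B returns the smallest
-- step number greater than current_step (or none), the intended next sequential step.
def D_get_next_step_number (current_step : Int) (steps : List (List (String × Int))) (override_next : Option Int) : Prop :=
  (∀ ov ∈ override_next.toList, ∀ s ∈ steps, PySem.Dict.get? { items := s } "step_number" ≠ some ov) ∧
  2 ≤ (steps.filter (fun s => PySem.Dict.getD { items := s } "step_number" 0 = current_step)).length
instance (current_step : Int) (steps : List (List (String × Int))) (override_next : Option Int) : Decidable (D_get_next_step_number current_step steps override_next) := by unfold D_get_next_step_number; infer_instance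

def Spec_get_next_step_number (current_step : Int) (steps : List (List (String × Int))) (override_next : Option Int) (out : Option Int) : Prop := ¬ D_get_next_step_number current_step steps override_next → out = get_next_step_number_alt current_step steps override_next
instance (current_step : Int) (steps : List (List (String × Int))) (override_next : Option Int) (out : Option Int) : Decidable (Spec_get_next_step_number current_step steps override_next out) := by unfold Spec_get_next_step_number; infer_instance

def pvDiffWitness_get_next_step_number : Int × (List (List (String × Int))) × Option Int :=
  (1, [[("step_number", 1)], [("step_number", 1)]], none)
def pvDiffWitnessOut_get_next_step_number : (Option Int) × (Option Int) := (some 1, none)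

-- ===== CLAIM (what is proved, stated in full; the proofs are below) =====
def Claim_unchanged_get_next_step_number : Prop := ∀ (current_step : Int) (steps : List (List (String × Int))) (override_next : Option Int), Dom_get_next_step_number current_step steps override_next → Spec_get_next_step_number current_step steps override_next (get_next_step_number current_step steps override_next)
def Claim_changed_get_next_step_number : Prop := Dom_get_next_step_number (pvDiffWitness_get_next_step_number.1) (pvDiffWitness_get_next_step_number.2.1) (pvDiffWitness_get_next_step_number.2.2) ∧ D_get_next_step_number (pvDiffWitness_get_next_step_number.1) (pvDiffWitness_get_next_step_number.2.1) (pvDiffWitness_get_next_step_number.2.2) ∧ get_next_step_number (pvDiffWitness_get_next_step_number.1) (pvDiffWitness_get_next_step_number.2.1) (pvDiffWitness_get_next_step_number.2.2) = pvDiffWitnessOut_get_next_step_number.1 ∧ get_next_step_number_alt (pvDiffWitness_get_next_step_number.1) (pvDiffWitness_get_next_step_number.2.1) (pvDiffWitness_get_next_step_number.2.2) = pvDiffWitnessOut_get_next_step_number.2 ∧ pvDiffWitnessOut_get_next_step_number.1 ≠ pvDiffWitnessOut_get_next_step_number.2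
def Claim_exact_get_next_step_number : Prop := ∀ (current_step : Int) (steps : List (List (String × Int))) (override_next : Option Int), Dom_get_next_step_number current_step steps override_next → D_get_next_step_number current_step steps override_next → get_next_step_number current_step steps override_next ≠ get_next_step_number_alt current_step steps override_next

-- ===== LEMMAS AND PROOFS =====

-- the predicate of the override 'any' and the number extracted per step
def pvPred (override_next : Option Int) (s : List (String × Int)) : Bool :=
  match override_next with
  | some ov => (PySem.Dict.mk s).get? "step_number" == some ov
  | none => false

def pvNum (s : List (String × Int)) : Int := (PySem.Dict.mk s).getD "step_number" 0

-- minimum of the elements of l greater than x (what B's running minimum computes)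
def pvMin (x : Int) (l : List Int) : Option Int :=
  PySem.List.min? (l.filter (fun n => decide (x < n))) (fun y => y)

lemma pvMin_eq_of_perm (x : Int) {l l' : List Int} (h : l.Perm l') : pvMin x l = pvMin x l' := by
  have hp : (l.filter (fun n => decide (x < n))).Perm (l'.filter (fun n => decide (x < n))) :=
    h.filter _
  unfold pvMin
  cases h1 : PySem.List.min? (l.filter (fun n => decide (x < n))) (fun y => y) with
  | none =>
      have h0 := (PySem.List.min?_eq_none_iff _ _).mp h1
      rw [h0] at hp
      rw [eq_comm, (PySem.List.min?_eq_none_iff _ _)]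
      exact hp.symm.eq_nil
  | some m =>
      cases h2 : PySem.List.min? (l'.filter (fun n => decide (x < n))) (fun y => y) with
      | none =>
          have h0 := (PySem.List.min?_eq_none_iff _ _).mp h2
          rw [h0] at hp
          rw [← h1, (PySem.List.min?_eq_none_iff _ _)]
          exact hp.eq_nil
      | some m' =>
          have hm := PySem.List.min?_mem h1
          have hm' := PySem.List.min?_mem h2
          have h3 := PySem.List.min?_isMin h1 m' (hp.mem_iff.mpr hm')
          have h4 := PySem.List.min?_isMin h2 m (hp.mem_iff.mp hm)
          simp only [Option.some.injEq]
          omega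

-- a pvMin result is strictly greater than x, hence never x itself
lemma pvMin_ne_self (x : Int) (l : List Int) : pvMin x l ≠ some x := by
  intro h
  have hmem := PySem.List.min?_mem h
  simp only [List.mem_filter, decide_eq_true_eq] at hmem
  omega

-- Python's 'if idx + 1 < len(L): return L[idx+1] ; return None' is L[idx+1]?
lemma guard_get (L : List Int) (idx : Nat) :
    (if ((idx : Int) + 1) < (L.length : Int) then PySem.List.pyGet? L ((idx : Int) + 1) else none)
    = L[idx + 1]? := by
  have hc : ((idx : Int) + 1) = ((idx + 1 : Nat) : Int) := by push_cast; ring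
  rw [hc, PySem.List.pyGet?_natCast]
  by_cases h : idx + 1 < L.length
  · rw [if_pos (by exact_mod_cast h)]
  · rw [if_neg (by exact_mod_cast h), eq_comm, List.getElem?_eq_none_iff]
    omega

-- the tail computation of A on a ≤-sorted list, in terms of count and pvMin
lemma atail_sorted (x : Int) (L : List Int) (hs : L.Pairwise (· ≤ ·)) :
    (match PySem.List.index? L x with
     | some idx => L[idx + 1]?
     | none => none)
    = (if 2 ≤ L.count x then some x else if L.count x = 1 then pvMin x L else none) := by
  induction L with
  | nil => simp [PySem.List.index?]
  | cons a t ih =>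
      rcases List.pairwise_cons.mp hs with ⟨ha, ht⟩
      by_cases hax : a = x
      · subst hax
        simp only [PySem.List.index?_cons_self, List.getElem?_cons_succ]
        cases t with
        | nil =>
            simp [pvMin, PySem.List.min?]
        | cons b t' =>
            by_cases hbx : b = a
            · subst hbx
              have h2 : 2 ≤ (b :: b :: t').count b := by simp
              rw [if_pos h2]; rfl
            · have hab : a < b := lt_of_le_of_ne (ha b (by simp)) (Ne.symm hbx)
              rcases List.pairwise_cons.mp ht with ⟨hb, _⟩
              have hnot : a ∉ t' := by
                intro hmem; have := hb a hmem; omega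
              have hcount : (a :: b :: t').count a = 1 := by
                simp [hbx, List.count_eq_zero.mpr hnot]
              rw [if_neg (by omega), if_pos hcount]
              -- pvMin a (a :: b :: t') = some b = (b :: t')[0]?
              unfold pvMin
              cases hmin : PySem.List.min? (((a :: b :: t').filter (fun n => decide (a < n)))) (fun y => y) with
              | none =>
                  have h0 := (PySem.List.min?_eq_none_iff _ _).mp hmin
                  have : b ∈ (a :: b :: t').filter (fun n => decide (a < n)) := by
                    simp [List.mem_filter, hab]
                  rw [h0] at this; simp at this
              | some m =>
                  have hmem := PySem.List.min?_mem hmin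
                  have hmb := PySem.List.min?_isMin hmin b (by simp [List.mem_filter, hab])
                  simp only [List.mem_filter, decide_eq_true_eq] at hmem
                  have hbm : b ≤ m := by
                    rcases hmem with ⟨hm1, _⟩
                    rcases List.mem_cons.mp hm1 with h | h
                    · omega
                    · rcases List.mem_cons.mp h with h | h
                      · omega
                      · exact hb m h
                  have : m = b := by omega
                  rw [this]; rfl
      · rw [PySem.List.index?_cons_of_ne _ hax]
        have hstep : (match Option.map (fun i => i + 1) (PySem.List.index? t x) with
             | some idx => (a :: t)[idx + 1]?
             | none => (none : Option Int))
            = (match PySem.List.index? t x with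
             | some idx => t[idx + 1]?
             | none => none) := by
          cases hidx : PySem.List.index? t x with
          | none => rfl
          | some i => simp
        rw [hstep, ih ht]
        have hcount : (a :: t).count x = t.count x := by simp [hax]
        rw [hcount]
        by_cases h1 : 2 ≤ t.count x
        · simp [h1]
        · by_cases h2 : t.count x = 1
          · have hx : x ∈ t := List.count_pos_iff.mp (by omega)
            have hxa : ¬ (x < a) := by have := ha x hx; omega
            have hmm : pvMin x (a :: t) = pvMin x t := by
              unfold pvMin
              rw [List.filter_cons_of_neg (by simpa using hxa)]
            simp [h2, hmm]
          · simp [h1, h2]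

-- named form of B's running-minimum update (used to state the fold lemmas)
def pvUpd (x : Int) (sc : Option Int) (n : Int) : Option Int :=
  if n = x then sc
  else match sc with
    | none => if x < n then some n else sc
    | some m => if x < n ∧ n < m then some n else sc

-- B's fold splits into three independent folds
lemma fold_split (current_step : Int) (override_next : Option Int) (steps : List (List (String × Int)))
    (f0 b0 : Bool) (s0 : Option Int) :
    steps.foldl (fun acc s =>
      let n := (PySem.Dict.mk s).getD "step_number" 0
      let found := acc.1 ||
        (match override_next, s with
         | some ov, s => (PySem.Dict.mk s).get? "step_number" == some ov
         | none, s => false)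
      if n = current_step then (found, true, acc.2.2)
      else
        match acc.2.2 with
        | none => if current_step < n then (found, acc.2.1, some n) else (found, acc.2.1, acc.2.2)
        | some m => if current_step < n ∧ n < m then (found, acc.2.1, some n) else (found, acc.2.1, acc.2.2)
      ) (f0, b0, s0)
    = (f0 || steps.any (pvPred override_next),
       b0 || (steps.map pvNum).any (· == current_step),
       (steps.map pvNum).foldl (pvUpd current_step) s0) := by
  induction steps generalizing f0 b0 s0 with
  | nil => simp
  | cons s t ih =>
      simp only [List.foldl_cons, List.any_cons, List.map_cons]
      by_cases hn : (PySem.Dict.mk s).getD "step_number" 0 = current_step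
      · simp only [hn, if_true, eq_self_iff_true, ih]
        refine Prod.ext ?_ (Prod.ext ?_ ?_)
        · cases override_next <;> simp [pvPred, Bool.or_assoc]
        · simp [pvNum, hn]
        · simp only [List.foldl_cons]
          have h2 : pvUpd current_step s0 (pvNum s) = s0 := by
            unfold pvUpd pvNum; simp [hn]
          simp [h2]
      · have hnum : pvNum s ≠ current_step := hn
        cases s0 with
        | none =>
            by_cases hlt : current_step < (PySem.Dict.mk s).getD "step_number" 0
            · simp only [hn, if_neg hn, hlt, if_true, ih]
              refine Prod.ext ?_ (Prod.ext ?_ ?_)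
              · cases override_next <;> simp [pvPred, Bool.or_assoc]
              · have hb : (((PySem.Dict.mk s).getD "step_number" 0 : Int) == current_step) = false := by
                  simp [hn]
                simp [pvNum, hb]
              · simp only [List.foldl_cons]
                have h2 : pvUpd current_step none (pvNum s) = some ((PySem.Dict.mk s).getD "step_number" 0) := by
                  unfold pvUpd pvNum; simp [hn, hlt]
                simp [h2]
            · simp only [hn, if_neg hn, hlt, if_false, ih]
              refine Prod.ext ?_ (Prod.ext ?_ ?_)
              · cases override_next <;> simp [pvPred, Bool.or_assoc]
              · have hb : (((PySem.Dict.mk s).getD "step_number" 0 : Int) == current_step) = false := by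
                  simp [hn]
                simp [pvNum, hb]
              · simp only [List.foldl_cons]
                have h2 : pvUpd current_step none (pvNum s) = none := by
                  unfold pvUpd pvNum; simp [hn, hlt]
                simp [h2]
        | some m =>
            by_cases hlt : current_step < (PySem.Dict.mk s).getD "step_number" 0 ∧ (PySem.Dict.mk s).getD "step_number" 0 < m
            · simp only [hn, if_neg hn, hlt, if_true, ih]
              refine Prod.ext ?_ (Prod.ext ?_ ?_)
              · cases override_next <;> simp [pvPred, Bool.or_assoc]
              · have hb : (((PySem.Dict.mk s).getD "step_number" 0 : Int) == current_step) = false := by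
                  simp [hn]
                simp [pvNum, hb]
              · simp only [List.foldl_cons]
                have h2 : pvUpd current_step (some m) (pvNum s) = some ((PySem.Dict.mk s).getD "step_number" 0) := by
                  unfold pvUpd pvNum; simp [hn, hlt]
                simp [h2]
            · simp only [hn, if_neg hn, if_neg hlt, ih]
              refine Prod.ext ?_ (Prod.ext ?_ ?_)
              · cases override_next <;> simp [pvPred, Bool.or_assoc]
              · have hb : (((PySem.Dict.mk s).getD "step_number" 0 : Int) == current_step) = false := by
                  simp [hn]
                simp [pvNum, hb]
              · simp only [List.foldl_cons]
                have h2 : pvUpd current_step (some m) (pvNum s) = some m := by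
                  unfold pvUpd pvNum; simp [hn]; intro h; omega
                simp [h2]

-- the running minimum computes pvMin
lemma succ_fold (x : Int) (l : List Int) (s0 : Option Int) :
    l.foldl (pvUpd x) s0
    = (match s0, pvMin x l with
       | none, r => r
       | some m, none => some m
       | some m, some r => some (min m r)) := by
  induction l generalizing s0 with
  | nil => cases s0 <;> simp [pvMin, PySem.List.min?]
  | cons n t ih =>
      have hmin_cons : x < n → pvMin x (n :: t) =
          (match pvMin x t with
           | none => some n
           | some r => some (if n ≤ r then n else r)) := by
        intro hx
        unfold pvMin
        rw [List.filter_cons_of_pos (by simpa using hx)]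
        cases hmt : PySem.List.min? (t.filter (fun m => decide (x < m))) (fun y => y) with
        | none =>
            have h0 := (PySem.List.min?_eq_none_iff _ _).mp hmt
            simp [h0, PySem.List.min?]
        | some r =>
            have hmem := PySem.List.min?_mem hmt
            have hisMin := PySem.List.min?_isMin hmt
            cases hres : PySem.List.min? (n :: t.filter (fun m => decide (x < m))) (fun y => y) with
            | none =>
                have h0 := (PySem.List.min?_eq_none_iff _ _).mp hres
                simp at h0
            | some w =>
                have hwmem := PySem.List.min?_mem hres
                have hwisMin := PySem.List.min?_isMin hres
                have hwn : w ≤ n := hwisMin n (by simp)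
                have hwr : w ≤ r := hwisMin r (by simp [hmem])
                have hrw : n ≤ w ∨ r ≤ w := by
                  rcases List.mem_cons.mp hwmem with h | h
                  · left; omega
                  · right; exact hisMin w h
                simp only [Option.some.injEq]
                split_ifs with hc
                · omega
                · have : r ≤ w := by rcases hrw with h | h <;> omega
                  omega
      have hmin_skip : ¬ (x < n) → pvMin x (n :: t) = pvMin x t := by
        intro hx; unfold pvMin; rw [List.filter_cons_of_neg (by simpa using hx)]
      simp only [List.foldl_cons]
      by_cases hnx : n = x
      · have hns : pvUpd x s0 n = s0 := by unfold pvUpd; simp [hnx]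
        rw [hns, ih, hmin_skip (by omega)]
      · by_cases hx : x < n
        · cases s0 with
          | none =>
              have hns : pvUpd x none n = some n := by unfold pvUpd; simp [hnx, hx]
              rw [hns, ih, hmin_cons hx]
              cases hmt : pvMin x t with
              | none => simp
              | some r =>
                  have hxr : x < r := by
                    have hmem := PySem.List.min?_mem (show PySem.List.min? (t.filter (fun n => decide (x < n))) (fun y => y) = some r from hmt)
                    simp only [List.mem_filter, decide_eq_true_eq] at hmem
                    exact hmem.2
                  simp only
                  split_ifs with h <;> simp [min_def] <;> omega
          | some m =>
              by_cases hnm : n < m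
              · have hns : pvUpd x (some m) n = some n := by unfold pvUpd; simp [hnx, hx, hnm]
                rw [hns, ih, hmin_cons hx]
                cases hmt : pvMin x t with
                | none => simp [min_def]; omega
                | some r => simp only [min_def]; split_ifs <;> simp_all <;> omega
              · have hns : pvUpd x (some m) n = some m := by
                  unfold pvUpd; simp [hnx]; intro h; omega
                rw [hns, ih, hmin_cons hx]
                cases hmt : pvMin x t with
                | none => simp [min_def]; omega
                | some r => simp only [min_def]; split_ifs <;> simp_all <;> omega
        · have hns : pvUpd x s0 n = s0 := by
            unfold pvUpd; cases s0 <;> simp [hnx, hx]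
          rw [hns, ih, hmin_skip hx]

-- the normal forms of the two ports
lemma alt_eq_norm (current_step : Int) (steps : List (List (String × Int))) (override_next : Option Int) :
    get_next_step_number_alt current_step steps override_next
    = (if steps.any (pvPred override_next) then override_next
       else if (steps.map pvNum).any (· == current_step) then pvMin current_step (steps.map pvNum)
       else none) := by
  unfold get_next_step_number_alt
  rw [fold_split, succ_fold]
  simp only [Bool.false_or]

lemma a_eq_norm (current_step : Int) (steps : List (List (String × Int))) (override_next : Option Int) :
    get_next_step_number current_step steps override_next
    = (if steps.any (pvPred override_next) then override_next
       else if 2 ≤ (steps.map pvNum).count current_step then some current_step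
       else if (steps.map pvNum).count current_step = 1 then pvMin current_step (steps.map pvNum)
       else none) := by
  unfold get_next_step_number
  have hvald : (match override_next with
      | some ov => steps.any (fun s => (PySem.Dict.mk s).get? "step_number" == some ov)
      | none => false) = steps.any (pvPred override_next) := by
    cases override_next with
    | none => simp [pvPred]
    | some ov => rfl
  rw [hvald]
  by_cases hany : steps.any (pvPred override_next) = true
  · simp [hany]
  · simp only [Bool.not_eq_true] at hany
    rw [if_neg (by simp [hany]), if_neg (by simp [hany])]
    have hperm : (PySem.List.sorted (steps.map (fun s => (PySem.Dict.mk s).getD "step_number" 0)) (fun x => x) false).Perm (steps.map pvNum) :=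
      PySem.List.sorted_perm _ _ _
    have hsorted : (PySem.List.sorted (steps.map (fun s => (PySem.Dict.mk s).getD "step_number" 0)) (fun x => x) false).Pairwise (· ≤ ·) := by
      have := PySem.List.sorted_pairwise (steps.map (fun s => (PySem.Dict.mk s).getD "step_number" 0)) (fun x => x)
      simpa using this
    have hguard : (match PySem.List.index? (PySem.List.sorted (steps.map (fun s => (PySem.Dict.mk s).getD "step_number" 0)) (fun x => x) false) current_step with
        | some idx =>
            if ((idx : Int) + 1) < ((PySem.List.sorted (steps.map (fun s => (PySem.Dict.mk s).getD "step_number" 0)) (fun x => x) false).length : Int) then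
              PySem.List.pyGet? (PySem.List.sorted (steps.map (fun s => (PySem.Dict.mk s).getD "step_number" 0)) (fun x => x) false) ((idx : Int) + 1)
            else none
        | none => none)
        = (match PySem.List.index? (PySem.List.sorted (steps.map (fun s => (PySem.Dict.mk s).getD "step_number" 0)) (fun x => x) false) current_step with
        | some idx => (PySem.List.sorted (steps.map (fun s => (PySem.Dict.mk s).getD "step_number" 0)) (fun x => x) false)[idx + 1]?
        | none => none) := by
      cases PySem.List.index? (PySem.List.sorted (steps.map (fun s => (PySem.Dict.mk s).getD "step_number" 0)) (fun x => x) false) current_step with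
      | none => rfl
      | some idx => exact guard_get _ idx
    rw [hguard, atail_sorted current_step _ hsorted, hperm.count_eq current_step,
        pvMin_eq_of_perm current_step hperm]

-- l.any (· == x) is membership
lemma any_eq_mem (l : List Int) (x : Int) : ((l.any (· == x)) = true) ↔ x ∈ l := by
  simp only [List.any_eq_true, beq_iff_eq]
  exact ⟨fun ⟨a, ha, he⟩ => he ▸ ha, fun h => ⟨x, h, rfl⟩⟩

-- D_ restated through pvPred/pvNum
lemma d_iff (current_step : Int) (steps : List (List (String × Int))) (override_next : Option Int) :
    D_get_next_step_number current_step steps override_next ↔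
      (¬ steps.any (pvPred override_next) = true ∧ 2 ≤ (steps.map pvNum).count current_step) := by
  unfold D_get_next_step_number pvPred pvNum
  have hcnt : (steps.filter (fun s => PySem.Dict.getD { items := s } "step_number" 0 = current_step)).length
      = (steps.map (fun s => (PySem.Dict.mk s).getD "step_number" 0)).count current_step := by
    induction steps with
    | nil => simp
    | cons s t ih =>
        by_cases h : PySem.Dict.getD { items := s } "step_number" 0 = current_step
        · simp [h, ih, PySem.Dict.mk, List.count_cons]
        · simp [h, ih, PySem.Dict.mk, List.count_cons]
  rw [hcnt]
  cases override_next with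
  | none => simp [PySem.Dict.mk]
  | some ov => simp [List.any_eq_true, PySem.Dict.mk]

-- ===== VERDICT (by name: the statement is the Claim_ definition above) =====
theorem get_next_step_number_spec : Claim_unchanged_get_next_step_number := by
  intro current_step steps override_next _
  unfold Spec_get_next_step_number
  intro hD
  rw [a_eq_norm, alt_eq_norm]
  by_cases hany : steps.any (pvPred override_next) = true
  · simp [hany]
  · rw [if_neg hany, if_neg hany]
    have hnot2 : ¬ 2 ≤ (steps.map pvNum).count current_step := by
      intro h2; exact hD ((d_iff _ _ _).mpr ⟨hany, h2⟩)
    rw [if_neg hnot2]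
    by_cases h1 : (steps.map pvNum).count current_step = 1
    · have hmem : current_step ∈ steps.map pvNum := List.count_pos_iff.mp (by omega)
      rw [if_pos h1, if_pos ((any_eq_mem _ _).mpr hmem)]
    · have hzero : (steps.map pvNum).count current_step = 0 := by omega
      have hnmem : current_step ∉ steps.map pvNum := List.count_eq_zero.mp hzero
      have hfalse : ¬ (((steps.map pvNum).any (· == current_step)) = true) := by
        rw [any_eq_mem]; exact hnmem
      rw [if_neg h1, if_neg hfalse]

theorem get_next_step_number_changed : Claim_changed_get_next_step_number := by
  unfold Claim_changed_get_next_step_number; decide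

theorem get_next_step_number_tight : Claim_exact_get_next_step_number := by
  intro current_step steps override_next _ hD
  rcases (d_iff _ _ _).mp hD with ⟨hany, h2⟩
  rw [a_eq_norm, alt_eq_norm, if_neg hany, if_neg hany, if_pos h2]
  have hmem : current_step ∈ steps.map pvNum := List.count_pos_iff.mp (by omega)
  rw [if_pos ((any_eq_mem _ _).mpr hmem)]
  exact fun h => pvMin_ne_self current_step (steps.map pvNum) h.symm
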